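-- pv_equiv track=rewrite | github.com/Kapponohacco/Artificial-intelligence | list1/pictures.py | opt_changes
-- ===== SOURCE A (Python) =====
-- def opt_changes(sequence: str, dist):
--     current = sequence[0:dist].count('1')
--     counter = current
--     opt = current
--     for i in range(1,len(sequence) - dist+1):
--         current = current - int(sequence[i-1]) + int(sequence[i+dist-1])
--         counter += int(sequence[i+dist-1])
--         if current > opt:
--             opt = current
--     return dist - opt + counter - opt
-- ===== SOURCE B (Python) =====
-- def opt_changes(sequence, dist):
--     n = len(sequence)
--     seed = sequence[0:dist].count('1')
--     k = n - dist
--     if k <= 0: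
--         return dist - seed
--     L = [0]
--     for c in sequence[:k]:
--         L.append(L[-1] + int(c))
--     R = [0]
--     for c in sequence[dist:]:
--         R.append(R[-1] + int(c))
--     best = 0
--     for i in range(1, k + 1):
--         diff = R[i] - L[i]
--         if diff > best:
--             best = diff
--     return dist - seed + R[k] - 2 * best
-- ===== Notes on version B (the rewrite author's own statement) =====
-- stated objective: alternative
-- what changed: Replaces A's incremental sliding-window update (current/counter/opt maintained per step) by two prefix-sum tables of digit values, a scan of their differences for the best window, and the closed-form result dist - seed + R[k] - 2*best.
import Mathlib
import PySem

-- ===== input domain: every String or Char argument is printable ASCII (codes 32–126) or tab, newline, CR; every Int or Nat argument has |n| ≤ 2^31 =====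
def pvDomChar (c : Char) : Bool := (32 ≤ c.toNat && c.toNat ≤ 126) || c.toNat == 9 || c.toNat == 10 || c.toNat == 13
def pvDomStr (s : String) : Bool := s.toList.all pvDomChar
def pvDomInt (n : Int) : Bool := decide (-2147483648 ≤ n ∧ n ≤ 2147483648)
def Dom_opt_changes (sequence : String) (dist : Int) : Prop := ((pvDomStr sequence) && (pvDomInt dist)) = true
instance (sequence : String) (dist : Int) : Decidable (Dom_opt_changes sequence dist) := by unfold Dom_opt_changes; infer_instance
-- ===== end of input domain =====

-- B replaces A's incremental sliding window by two prefix-sum tables and a scan of their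
-- differences with a closed-form final expression (objective: alternative decomposition).

-- int(c) for a one-character string: exact under Pre_ (every accessed char is an ASCII digit)
def pvIntChar (c : Char) : Int := if PySem.Chars.isdigit c then (c.toNat : Int) - 48 else 0
-- int(sequence[i]): exact under Pre_ (index in range forced by the loop bounds, digit char)
def pvIntAt (o : Option Char) : Int := (o.map pvIntChar).getD 0

-- ===== PORT A =====
def opt_changes (sequence : String) (dist : Int) : Int :=
  let cs := sequence.toList
  let current : Int := (PySem.Chars.count (PySem.List.slice cs (some 0) (some dist)) ['1'] : Int)
  let r := (PySem.List.pyRange 1 ((cs.length : Int) - dist + 1) 1).foldl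
    (fun (s : Int × Int × Int) (i : Int) =>
      let current := s.1 - pvIntAt (PySem.List.pyGet? cs (i - 1)) + pvIntAt (PySem.List.pyGet? cs (i + dist - 1))
      let counter := s.2.1 + pvIntAt (PySem.List.pyGet? cs (i + dist - 1))
      let opt := if current > s.2.2 then current else s.2.2
      (current, counter, opt))
    (current, current, current)
  dist - r.2.2 + r.2.1 - r.2.2

-- ===== PORT B =====
def opt_changes_alt (sequence : String) (dist : Int) : Int :=
  let cs := sequence.toList
  let n : Int := (cs.length : Int)
  let seed : Int := (PySem.Chars.count (PySem.List.slice cs (some 0) (some dist)) ['1'] : Int)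
  let k : Int := n - dist
  if k ≤ 0 then dist - seed
  else
    let L : List Int := (PySem.List.slice cs none (some k)).foldl
      (fun (a : List Int) c => a ++ [PySem.List.pyGetD a (-1) 0 + pvIntChar c]) [0]
    let R : List Int := (PySem.List.slice cs (some dist) none).foldl
      (fun (a : List Int) c => a ++ [PySem.List.pyGetD a (-1) 0 + pvIntChar c]) [0]
    let best : Int := (PySem.List.pyRange 1 (k + 1) 1).foldl
      (fun (best : Int) (i : Int) =>
        let diff := PySem.List.pyGetD R i 0 - PySem.List.pyGetD L i 0
        if diff > best then diff else best) 0
    dist - seed + PySem.List.pyGetD R k 0 - 2 * best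

-- ===== PRECONDITION & SPEC =====
-- Pre_ is exactly where the Python A returns: dist ≥ 0 (a negative dist makes the loop index
-- past the end, IndexError) and every character the loop ever feeds to int() — positions
-- [0, n-dist) and [dist, n) — is an ASCII digit (otherwise int() raises ValueError).
def Pre_opt_changes (sequence : String) (dist : Int) : Prop :=
  0 ≤ dist ∧ ∀ i : Nat, i < sequence.toList.length →
    (((i : Int) < (sequence.toList.length : Int) - dist) ∨ dist ≤ (i : Int)) →
    PySem.Chars.isdigit (sequence.toList.getD i ' ') = true
instance (sequence : String) (dist : Int) : Decidable (Pre_opt_changes sequence dist) := by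
  unfold Pre_opt_changes; infer_instance
def pvWitness_opt_changes : String × Int := ("10110", 2)

def Spec_opt_changes (sequence : String) (dist : Int) (out : Int) : Prop := out = opt_changes_alt sequence dist
instance (sequence : String) (dist : Int) (out : Int) : Decidable (Spec_opt_changes sequence dist out) := by unfold Spec_opt_changes; infer_instance

-- ===== CLAIM (what is proved, stated in full; the proofs are below) =====
def Claim_equal_opt_changes : Prop := ∀ (sequence : String) (dist : Int), Dom_opt_changes sequence dist → Pre_opt_changes sequence dist → Spec_opt_changes sequence dist (opt_changes sequence dist)

-- ===== LEMMAS AND PROOFS =====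

-- prefix sum of digit values of the first i characters
def pvLs (cs : List Char) (i : Nat) : Int := ((cs.take i).map pvIntChar).sum
-- prefix sum of digit values of i characters starting at position d
def pvRs (cs : List Char) (d i : Nat) : Int := (((cs.drop d).take i).map pvIntChar).sum
-- running maximum of the window-gain pvRs j - pvLs j over j ≤ k
def pvM (cs : List Char) (d : Nat) : Nat → Int
  | 0 => 0
  | j + 1 => max (pvM cs d j) (pvRs cs d (j + 1) - pvLs cs (j + 1))

theorem pvLs_succ (cs : List Char) (j : Nat) (h : j < cs.length) :
    pvLs cs (j + 1) = pvLs cs j + pvIntChar cs[j] := by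
  unfold pvLs
  rw [List.map_take, List.map_take, List.sum_take_succ _ _ (by simpa using h)]
  simp

theorem pvRs_succ (cs : List Char) (d j : Nat) (h : d + j < cs.length) :
    pvRs cs d (j + 1) = pvRs cs d j + pvIntChar cs[d + j] := by
  unfold pvRs
  have hj : j < (cs.drop d).length := by simp; omega
  rw [List.map_take, List.map_take, List.sum_take_succ _ _ (by simpa using hj)]
  simp [List.getElem_drop]

-- A's loop characterized: state after k iterations
theorem pvAloop (cs : List Char) (d k : Nat) (h : d + k ≤ cs.length) (seed : Int) :
    (PySem.List.pyRange 1 ((k : Int) + 1) 1).foldl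
      (fun (s : Int × Int × Int) (i : Int) =>
        let current := s.1 - pvIntAt (PySem.List.pyGet? cs (i - 1)) + pvIntAt (PySem.List.pyGet? cs (i + (d : Int) - 1))
        let counter := s.2.1 + pvIntAt (PySem.List.pyGet? cs (i + (d : Int) - 1))
        let opt := if current > s.2.2 then current else s.2.2
        (current, counter, opt))
      (seed, seed, seed)
    = (seed + pvRs cs d k - pvLs cs k, seed + pvRs cs d k, seed + pvM cs d k) := by
  induction k with
  | zero =>
      rw [PySem.List.pyRange_one_eq_nil (by norm_num)]
      simp [pvRs, pvLs, pvM]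
  | succ k ih =>
      have h' : d + k ≤ cs.length := by omega
      have hk : k < cs.length := by omega
      have hdk : d + k < cs.length := by omega
      have hsplit : PySem.List.pyRange 1 (((k + 1 : Nat) : Int) + 1) 1
          = PySem.List.pyRange 1 ((k : Int) + 1) 1 ++ [(k : Int) + 1] := by
        push_cast
        rw [PySem.List.pyRange_one_succ_right (by omega)]
      rw [hsplit, List.foldl_append, ih h']
      have e1 : ((k : Int) + 1 - 1) = ((k : Nat) : Int) := by ring
      have e2 : ((k : Int) + 1 + (d : Int) - 1) = (((d + k : Nat)) : Int) := by push_cast; ring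
      simp only [List.foldl_cons, List.foldl_nil, e1, e2, PySem.List.pyGet?_natCast,
        List.getElem?_eq_getElem hk, List.getElem?_eq_getElem hdk]
      simp only [pvM, pvIntAt, Option.map_some, Option.getD_some]
      rw [pvLs_succ cs k hk, pvRs_succ cs d k hdk, Prod.mk.injEq, Prod.mk.injEq]
      refine ⟨by ring, by ring, ?_⟩
      split_ifs <;> omega

-- B's list-building loop produces [0] followed by the prefix sums
theorem pvBuild (l : List Char) (acc : List Int) (x : Int) :
    l.foldl (fun (a : List Int) c => a ++ [PySem.List.pyGetD a (-1) 0 + pvIntChar c]) (acc ++ [x])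
    = acc ++ [x] ++ (List.range l.length).map (fun i => x + ((l.take (i + 1)).map pvIntChar).sum) := by
  induction l generalizing acc x with
  | nil => simp
  | cons c l ih =>
      rw [List.foldl_cons, PySem.List.pyGetD_neg_one_append_singleton]
      rw [show (acc ++ [x]) ++ [x + pvIntChar c] = (acc ++ [x]) ++ [x + pvIntChar c] from rfl]
      rw [ih (acc ++ [x]) (x + pvIntChar c)]
      simp only [List.length_cons, List.range_succ_eq_map, List.map_cons, List.map_map]
      simp [Function.comp, add_assoc]

theorem pvGetDBuilt (l : List Char) (j : Nat) (hj : j ≤ l.length) :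
    (([0] ++ (List.range l.length).map (fun i => (0 : Int) + ((l.take (i + 1)).map pvIntChar).sum)) : List Int).getD j 0
    = ((l.take j).map pvIntChar).sum := by
  cases j with
  | zero => simp
  | succ j =>
      have hj' : j < l.length := by omega
      simp [List.getD, List.getElem?_map, List.getElem?_range hj']

-- B's max loop characterized
theorem pvBloop (L R : List Int) (cs : List Char) (d k : Nat)
    (hL : ∀ j, j ≤ k → L.getD j 0 = pvLs cs j)
    (hR : ∀ j, j ≤ k → R.getD j 0 = pvRs cs d j) :
    (PySem.List.pyRange 1 ((k : Int) + 1) 1).foldl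
      (fun (best : Int) (i : Int) =>
        let diff := PySem.List.pyGetD R i 0 - PySem.List.pyGetD L i 0
        if diff > best then diff else best) 0
    = pvM cs d k := by
  induction k with
  | zero =>
      rw [PySem.List.pyRange_one_eq_nil (by norm_num)]
      simp [pvM]
  | succ k ih =>
      have hsplit : PySem.List.pyRange 1 (((k + 1 : Nat) : Int) + 1) 1
          = PySem.List.pyRange 1 ((k : Int) + 1) 1 ++ [(k : Int) + 1] := by
        push_cast
        rw [PySem.List.pyRange_one_succ_right (by omega)]
      rw [hsplit, List.foldl_append, ih (fun j hj => hL j (by omega)) (fun j hj => hR j (by omega))]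
      have e : ((k : Int) + 1) = (((k + 1 : Nat)) : Int) := by push_cast; ring
      simp only [List.foldl_cons, List.foldl_nil, e, PySem.List.pyGetD_natCast,
        hL (k + 1) le_rfl, hR (k + 1) le_rfl, pvM]
      split_ifs <;> omega

-- ===== VERDICT (by name: the statement is the Claim_ definition above) =====
theorem opt_changes_spec : Claim_equal_opt_changes := by
  intro sequence dist _ hpre
  obtain ⟨hd0, hdig⟩ := hpre
  unfold Spec_opt_changes opt_changes opt_changes_alt
  simp only []
  set cs := sequence.toList with hcs
  by_cases hbig : (cs.length : Int) - dist ≤ 0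
  · rw [if_pos hbig, PySem.List.pyRange_one_eq_nil (by omega)]
    simp only [List.foldl_nil]
    ring
  · rw [if_neg hbig]
    set d : Nat := dist.toNat with hdd
    have hd : dist = (d : Int) := (Int.toNat_of_nonneg hd0).symm
    set k : Nat := cs.length - d with hkk
    have hdn : d < cs.length := by omega
    have hnk : (cs.length : Int) - dist = (k : Int) := by omega
    rw [hnk, hd]
    rw [pvAloop cs d k (by omega)]
    have hLeq : PySem.List.slice cs none (some ((k : Nat) : Int)) = cs.take k := by
      exact PySem.List.slice_to_natCast cs k
    have hReq : PySem.List.slice cs (some ((d : Nat) : Int)) none = cs.drop d := by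
      exact PySem.List.slice_from_natCast cs d
    rw [hLeq, hReq]
    have hL : ∀ j, j ≤ k → ((cs.take k).foldl
        (fun (a : List Int) c => a ++ [PySem.List.pyGetD a (-1) 0 + pvIntChar c]) [0]).getD j 0
        = pvLs cs j := by
      intro j hj
      have hlen : (cs.take k).length = k := by simp; omega
      rw [show ([(0 : Int)] : List Int) = [] ++ [0] from rfl, pvBuild]
      have hgd := pvGetDBuilt (cs.take k) j (by omega)
      simp only [List.nil_append] at hgd ⊢
      rw [hgd, List.take_take, Nat.min_eq_left hj]
      rfl
    have hR : ∀ j, j ≤ k → ((cs.drop d).foldl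
        (fun (a : List Int) c => a ++ [PySem.List.pyGetD a (-1) 0 + pvIntChar c]) [0]).getD j 0
        = pvRs cs d j := by
      intro j hj
      have hlen : (cs.drop d).length = k := by simp; omega
      rw [show ([(0 : Int)] : List Int) = [] ++ [0] from rfl, pvBuild]
      have hgd := pvGetDBuilt (cs.drop d) j (by omega)
      simp only [List.nil_append] at hgd ⊢
      rw [hgd]
      rfl
    rw [pvBloop _ _ cs d k hL hR, PySem.List.pyGetD_natCast, hR k le_rfl]
    ring
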